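-- pv_equiv track=rewrite | github.com/ianpreston/redditfs | redditfs.py | _sanitize_path
-- ===== SOURCE A (Python) =====
-- def _sanitize_path(path):
--     replace = (
--         ('/', ''),
--         (' ', '_'),
--         ("'", ''),
--         ('"', ''),
--     )
--     for r in replace:
--         path = path.replace(*r)
--     return path.lower()
-- ===== SOURCE B (Python) =====
-- def _sanitize_path(path):
--     out = []
--     for ch in path:
--         if ch in "/'\"":
--             continue
--         if ch == ' ':
--             out.append('_')
--         else:
--             out.append(ch.lower())
--     return ''.join(out)
-- ===== Notes on version B (the rewrite author's own statement) =====
-- stated objective: simpler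
-- what changed: Replaced A's four full-string replace passes plus a final lower pass with one character-by-character traversal that emits each character's mapped form and joins once.
import Mathlib
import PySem

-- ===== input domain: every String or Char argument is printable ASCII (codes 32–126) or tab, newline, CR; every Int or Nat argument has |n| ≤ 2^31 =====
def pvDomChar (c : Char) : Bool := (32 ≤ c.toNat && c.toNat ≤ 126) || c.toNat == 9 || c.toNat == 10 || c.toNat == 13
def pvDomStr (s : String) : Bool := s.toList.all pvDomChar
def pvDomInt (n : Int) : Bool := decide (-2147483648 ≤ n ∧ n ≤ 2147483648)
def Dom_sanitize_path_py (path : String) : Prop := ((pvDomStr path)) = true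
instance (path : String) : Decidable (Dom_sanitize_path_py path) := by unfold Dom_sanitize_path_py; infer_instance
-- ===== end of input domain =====

-- B replaces A's four full-string replace passes plus a final lower pass with a single
-- character-by-character traversal emitting each character's mapped form (objective: simpler).

-- ===== PORT A =====
def sanitize_path_py (path : String) : String :=
  let replace : List (String × String) := [("/", ""), (" ", "_"), ("'", ""), ("\"", "")]
  let path := replace.foldl (fun p r => PySem.Str.replace p r.1 r.2) path
  PySem.Str.lower path

-- ===== PORT B =====
def sanitize_path_py_alt (path : String) : String :=
  let out : List String := path.toList.foldl (fun out ch =>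
    if ch = '/' ∨ ch = '\'' ∨ ch = '"' then out
    else if ch = ' ' then out ++ ["_"]
    else out ++ [PySem.Str.lower (String.mk [ch])]) []
  PySem.Str.join "" out

-- ===== PRECONDITION & SPEC =====
def Spec_sanitize_path_py (path : String) (out : String) : Prop := out = sanitize_path_py_alt path
instance (path : String) (out : String) : Decidable (Spec_sanitize_path_py path out) := by unfold Spec_sanitize_path_py; infer_instance

-- ===== CLAIM (what is proved, stated in full; the proofs are below) =====
def Claim_equal_sanitize_path_py : Prop := ∀ (path : String), Dom_sanitize_path_py path → Spec_sanitize_path_py path (sanitize_path_py path)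

-- ===== LEMMAS AND PROOFS =====

-- Python's single-character str.replace is a flatMap over the characters.
theorem replace_go_single (a : Char) (new : List Char) :
    ∀ (fuel : Nat) (l acc : List Char), l.length ≤ fuel →
      PySem.Chars.replace.go [a] new fuel l acc =
        acc.reverse ++ l.flatMap (fun c => if c = a then new else [c]) := by
  intro fuel
  induction fuel with
  | zero =>
    intro l acc h
    have : l = [] := List.eq_nil_of_length_eq_zero (Nat.le_zero.mp h)
    subst this
    simp [PySem.Chars.replace.go]
  | succ n ih =>
    intro l acc h
    cases l with
    | nil => simp [PySem.Chars.replace.go]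
    | cons c t =>
      simp only [PySem.Chars.replace.go]
      by_cases hc : c = a
      · subst hc
        have hp : List.isPrefixOf [c] (c :: t) = true := by
          simp [List.isPrefixOf]
        rw [if_pos hp]
        simp only [List.length_cons, List.drop_succ_cons, List.length_nil, List.drop_zero]
        rw [ih t (new.reverse ++ acc) (Nat.le_of_succ_le_succ h)]
        simp
      · have hp : List.isPrefixOf [a] (c :: t) = false := by
          simp [List.isPrefixOf]
          exact fun h' => hc h'.symm
        rw [if_neg (by simp [hp])]
        rw [ih t (c :: acc) (Nat.le_of_succ_le_succ h)]
        simp [hc]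

theorem replace_single (s : List Char) (a : Char) (new : List Char) :
    PySem.Chars.replace s [a] new = s.flatMap (fun c => if c = a then new else [c]) := by
  rw [PySem.Chars.replace]
  simp only [List.isEmpty_cons]
  exact replace_go_single a new s.length s [] (le_refl _)

-- joining with the empty separator flattens
theorem intercalate_nil_char (parts : List (List Char)) :
    List.intercalate ([] : List Char) parts = parts.flatten := by
  induction parts with
  | nil => simp [List.intercalate]
  | cons p ps ih =>
    cases ps with
    | nil => simp [List.intercalate]
    | cons q qs =>
      simp [List.intercalate, List.intersperse] at *
      simpa [List.flatten] using ih

-- the per-character map both programs compute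
def pvPiece (c : Char) : List Char :=
  if c = '/' ∨ c = '\'' ∨ c = '"' then []
  else if c = ' ' then ['_']
  else [PySem.Chars.lowerChar c]

def pvPieceStrs (c : Char) : List String :=
  if c = '/' ∨ c = '\'' ∨ c = '"' then []
  else if c = ' ' then ["_"]
  else [PySem.Str.lower (String.mk [c])]

theorem b_fold_spec (l : List Char) :
    ∀ acc : List String,
      l.foldl (fun out ch =>
        if ch = '/' ∨ ch = '\'' ∨ ch = '"' then out
        else if ch = ' ' then out ++ ["_"]
        else out ++ [PySem.Str.lower (String.mk [ch])]) acc
      = acc ++ l.flatMap pvPieceStrs := by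
  induction l with
  | nil => simp
  | cons c t ih =>
    intro acc
    simp only [List.foldl_cons, List.flatMap_cons, pvPieceStrs]
    split_ifs with h1 h2 <;> simp [ih]

theorem mk_toList (l : List Char) : (String.mk l).toList = l :=
  Eq.symm (String.ofList_eq.mp rfl)

theorem pieces_toList (l : List Char) :
    (List.map String.toList (l.flatMap pvPieceStrs)).flatten = l.flatMap pvPiece := by
  induction l with
  | nil => simp
  | cons c t ih =>
    simp only [List.flatMap_cons, List.map_append, List.flatten_append, ih, pvPieceStrs, pvPiece]
    split_ifs with h1 h2
    · simp
    · simp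
    · simp [PySem.Str.toList_lower, PySem.Chars.lower, mk_toList]

theorem sanitize_alt_toList (path : String) :
    (sanitize_path_py_alt path).toList = path.toList.flatMap pvPiece := by
  unfold sanitize_path_py_alt
  rw [b_fold_spec, PySem.Str.toList_join]
  show PySem.Chars.join "".toList _ = _
  rw [show ("" : String).toList = [] from rfl, PySem.Chars.join, intercalate_nil_char]
  simpa using pieces_toList path.toList

theorem sanitize_toList (path : String) :
    (sanitize_path_py path).toList = path.toList.flatMap pvPiece := by
  unfold sanitize_path_py
  simp only [List.foldl_cons, List.foldl_nil]
  rw [PySem.Str.toList_lower, PySem.Str.toList_replace, PySem.Str.toList_replace,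
      PySem.Str.toList_replace, PySem.Str.toList_replace]
  rw [show ("/" : String).toList = ['/'] from rfl, show (" " : String).toList = [' '] from rfl,
      show ("'" : String).toList = ['\''] from rfl, show ("\"" : String).toList = ['"'] from rfl,
      show ("" : String).toList = [] from rfl, show ("_" : String).toList = ['_'] from rfl]
  rw [replace_single, replace_single, replace_single, replace_single]
  rw [PySem.Chars.lower, List.map_flatMap, List.flatMap_assoc, List.flatMap_assoc, List.flatMap_assoc]
  refine List.flatMap_congr (fun c _ => ?_)
  by_cases h1 : c = '/'
  · subst h1; simp [pvPiece]
  by_cases h2 : c = ' '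
  · subst h2; simp [pvPiece, PySem.Chars.lowerChar, PySem.Chars.isupper]
  by_cases h3 : c = '\''
  · subst h3; simp [pvPiece]
  by_cases h4 : c = '"'
  · subst h4; simp [pvPiece]
  · simp [h1, h2, h3, h4, pvPiece]

-- ===== VERDICT (by name: the statement is the Claim_ definition above) =====
theorem sanitize_path_py_spec : Claim_equal_sanitize_path_py := by
  intro path _
  unfold Spec_sanitize_path_py
  have h := (sanitize_toList path).trans (sanitize_alt_toList path).symm
  exact String.ext (by simpa [String.toList] using h)
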